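-- pv_equiv track=rewrite | github.com/ajul/cuda_texture_hash | long_period/long_period.py | generateHashFunction
-- ===== SOURCE A (Python) =====
-- _permutationVariableName = '_permutation'
--
-- def generateHashTerm(offset, factor, argi):
--     if offset > 0: offsetAddString = '%3d + ' % offset
--     else: offsetAddString = ' ' * 6
--
--     if argi == 0:
--         moduloTerm = '(arg0 %% %d)' % factor
--     else:
--         moduloTerm = '((%s + arg%d) %% %d)' % (
--             generateHashTerm(offset, factor, argi - 1),
--             argi,
--             factor)
--
--     return '%s%d[%s%s]' % (
--         _permutationVariableName,
--         factor,
--         offsetAddString,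
--         moduloTerm)
--
-- def generateHashFunction(outputRange, argc, factors):
--     result = '__device__ unsigned int long_period_hash('
--     result += ', '.join('unsigned int arg%d' % i for i in range(argc))
--     result += '){\n'
--     result += '    unsigned int result = 0;\n'
--     result += '\n'
--
--     offset = 0
--
--     for factorIndex, factor in enumerate(factors):
--         result += '    result = result + %s;\n' % generateHashTerm(offset, factor, argc - 1)
--         offset += factor
--
--     result += '\n'
--
--     result += '    return (result %% %d);\n' % outputRange
--     result += '}\n'
--
--     result += '\n'
--     return result
-- ===== SOURCE B (Python) =====
-- _permutationVariableName = '_permutation'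
--
-- def generateHashFunction(outputRange, argc, factors):
--     header = ('__device__ unsigned int long_period_hash('
--               + ', '.join('unsigned int arg%d' % i for i in range(argc))
--               + '){\n    unsigned int result = 0;\n\n')
--     body = ''
--     offset = 0
--     for factor in factors:
--         pad = ('%3d + ' % offset) if offset > 0 else (' ' * 6)
--         term = '%s%d[%s(arg0 %% %d)]' % (_permutationVariableName, factor, pad, factor)
--         for i in range(1, argc):
--             term = '%s%d[%s((%s + arg%d) %% %d)]' % (
--                 _permutationVariableName, factor, pad, term, i, factor)
--         body += '    result = result + %s;\n' % term
--         offset += factor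
--     return header + body + ('\n    return (result %% %d);\n}\n\n' % outputRange)
-- ===== Notes on version B (the rewrite author's own statement) =====
-- stated objective: simpler
-- what changed: The recursive generateHashTerm helper is replaced by an iterative inside-out builder: start from the innermost '(arg0 % factor)' term and wrap it once per argument index; the offset pad string is computed once per factor instead of at every recursion level.
import Mathlib
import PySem

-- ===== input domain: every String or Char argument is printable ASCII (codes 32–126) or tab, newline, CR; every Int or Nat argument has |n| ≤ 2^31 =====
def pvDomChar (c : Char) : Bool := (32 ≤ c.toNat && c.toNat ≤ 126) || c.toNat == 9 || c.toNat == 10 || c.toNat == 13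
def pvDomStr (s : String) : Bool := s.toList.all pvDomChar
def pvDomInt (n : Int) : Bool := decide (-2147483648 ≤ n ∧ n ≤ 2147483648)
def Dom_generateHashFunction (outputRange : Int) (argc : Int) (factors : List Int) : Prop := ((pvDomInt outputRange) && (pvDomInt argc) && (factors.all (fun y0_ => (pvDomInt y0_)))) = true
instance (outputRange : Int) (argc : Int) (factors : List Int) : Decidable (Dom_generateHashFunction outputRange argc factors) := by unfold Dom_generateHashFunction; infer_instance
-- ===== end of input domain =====

-- B replaces A's recursive generateHashTerm by an iterative inside-out term builder (objective: simpler decomposition, same cost).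

-- ===== PORT A =====

-- Python's '%3d' % n: right-justify str(n) in width 3 with spaces (shared formatting primitive).
def pvPad3 (n : Int) : String :=
  let l := PySem.Int.toChars n
  String.ofList (List.replicate (3 - l.length) ' ' ++ l)

-- A's generateHashTerm: the Python recursion decrements argi to 0; the Nat fuel (argi+1 at the
-- call site) only makes the identical recursion structurally total (0 fuel is unreachable under Pre_).
def generateHashTerm : Nat → Int → Int → Int → String
  | 0, _, _, _ => ""
  | fuel+1, offset, factor, argi =>
    let offsetAddString := if offset > 0 then pvPad3 offset ++ " + " else "      "
    let moduloTerm :=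
      if argi = 0 then "(arg0 % " ++ PySem.Int.toStr factor ++ ")"
      else "((" ++ generateHashTerm fuel offset factor (argi - 1) ++ " + arg" ++
           PySem.Int.toStr argi ++ ") % " ++ PySem.Int.toStr factor ++ ")"
    "_permutation" ++ PySem.Int.toStr factor ++ "[" ++ offsetAddString ++ moduloTerm ++ "]"

def generateHashFunction (outputRange : Int) (argc : Int) (factors : List Int) : String :=
  let result := "__device__ unsigned int long_period_hash("
  let result := result ++ PySem.Str.join ", "
    ((PySem.List.pyRange 0 argc 1).map (fun i => "unsigned int arg" ++ PySem.Int.toStr i))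
  let result := result ++ "){\n"
  let result := result ++ "    unsigned int result = 0;\n"
  let result := result ++ "\n"
  let st := (PySem.List.enumerate factors).foldl
    (fun (st : String × Int) p =>
      (st.1 ++ "    result = result + " ++
         generateHashTerm ((argc - 1).toNat + 1) st.2 p.2 (argc - 1) ++ ";\n",
       st.2 + p.2))
    (result, 0)
  let result := st.1 ++ "\n"
  let result := result ++ "    return (result % " ++ PySem.Int.toStr outputRange ++ ");\n"
  let result := result ++ "}\n"
  result ++ "\n"

-- ===== PORT B =====

-- iterative inside-out builder: innermost '(arg0 % f)' term, then wrap once for each i = 1 .. argc-1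
def pvAltTerm (offset : Int) (factor : Int) (argc : Int) : String :=
  let pad := if offset > 0 then pvPad3 offset ++ " + " else "      "
  let base := "_permutation" ++ PySem.Int.toStr factor ++ "[" ++ pad ++
              "(arg0 % " ++ PySem.Int.toStr factor ++ ")]"
  (PySem.List.pyRange 1 argc 1).foldl
    (fun term i =>
      "_permutation" ++ PySem.Int.toStr factor ++ "[" ++ pad ++ "((" ++ term ++
      " + arg" ++ PySem.Int.toStr i ++ ") % " ++ PySem.Int.toStr factor ++ ")]")
    base

def generateHashFunction_alt (outputRange : Int) (argc : Int) (factors : List Int) : String :=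
  let header := "__device__ unsigned int long_period_hash(" ++
    PySem.Str.join ", "
      ((PySem.List.pyRange 0 argc 1).map (fun i => "unsigned int arg" ++ PySem.Int.toStr i)) ++
    "){\n    unsigned int result = 0;\n\n"
  let st := factors.foldl
    (fun (st : String × Int) factor =>
      (st.1 ++ "    result = result + " ++ pvAltTerm st.2 factor argc ++ ";\n",
       st.2 + factor))
    ("", 0)
  header ++ st.1 ++ "\n    return (result % " ++ PySem.Int.toStr outputRange ++ ");\n}\n\n"

-- ===== PRECONDITION & SPEC =====
-- Pre_ excludes argc ≤ 0 with nonempty factors: there Python A recurses on argi = argc-1 < 0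
-- forever and raises RecursionError, returning no value.
def Pre_generateHashFunction (outputRange : Int) (argc : Int) (factors : List Int) : Prop :=
  factors = [] ∨ 1 ≤ argc
instance (outputRange : Int) (argc : Int) (factors : List Int) : Decidable (Pre_generateHashFunction outputRange argc factors) := by unfold Pre_generateHashFunction; infer_instance

def pvWitness_generateHashFunction : Int × Int × List Int := (10, 2, [3, 5])

def Spec_generateHashFunction (outputRange : Int) (argc : Int) (factors : List Int) (out : String) : Prop := out = generateHashFunction_alt outputRange argc factors
instance (outputRange : Int) (argc : Int) (factors : List Int) (out : String) : Decidable (Spec_generateHashFunction outputRange argc factors out) := by unfold Spec_generateHashFunction; infer_instance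

-- ===== CLAIM (what is proved, stated in full; the proofs are below) =====
def Claim_equal_generateHashFunction : Prop := ∀ (outputRange : Int) (argc : Int) (factors : List Int), Dom_generateHashFunction outputRange argc factors → Pre_generateHashFunction outputRange argc factors → Spec_generateHashFunction outputRange argc factors (generateHashFunction outputRange argc factors)

-- ===== LEMMAS AND PROOFS =====

-- the recursive term (with exact fuel n+1) equals the iterative inside-out term for argc = n+1
theorem term_eq (offset factor : Int) : ∀ (n : Nat),
    generateHashTerm (n + 1) offset factor (n : Int) = pvAltTerm offset factor ((n : Int) + 1) := by
  intro n
  induction n with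
  | zero =>
    simp [generateHashTerm, pvAltTerm, PySem.List.pyRange, String.append_assoc]
  | succ m ih =>
    have hne : ¬ ((m : Int) + 1 = 0) := by omega
    have hsplit : PySem.List.pyRange 1 ((m : Int) + 1 + 1) 1
        = PySem.List.pyRange 1 ((m : Int) + 1) 1 ++ PySem.List.pyRange ((m : Int) + 1) ((m : Int) + 1 + 1) 1 :=
      PySem.List.pyRange_one_append 1 ((m : Int) + 1) ((m : Int) + 1 + 1) (by omega) (by omega)
    have hlast : PySem.List.pyRange ((m : Int) + 1) ((m : Int) + 1 + 1) 1 = [(m : Int) + 1] := by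
      rw [PySem.List.pyRange_one_cons (by omega)]
      simp [PySem.List.pyRange]
    rw [show ((m : Nat) + 1 + 1) = (m + 1) + 1 from rfl]
    conv_lhs => rw [generateHashTerm]
    rw [pvAltTerm] at ih ⊢
    simp only [Nat.cast_succ, if_neg hne, show ((m : Int) + 1 - 1) = (m : Int) by ring] at *
    rw [ih, hsplit, hlast, List.foldl_append]
    simp [String.append_assoc]

-- A's fold over enumerate factors (index unused) equals B's fold over factors, given argc ≥ 1
theorem loop_eq (argc : Int) (hargc : 1 ≤ argc) :
    ∀ (factors : List Int) (k : Int) (b : String × Int),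
      (PySem.List.enumerate factors k).foldl
        (fun (st : String × Int) p =>
          (st.1 ++ "    result = result + " ++
             generateHashTerm ((argc - 1).toNat + 1) st.2 p.2 (argc - 1) ++ ";\n",
           st.2 + p.2)) b
      = factors.foldl
        (fun (st : String × Int) factor =>
          (st.1 ++ "    result = result + " ++ pvAltTerm st.2 factor argc ++ ";\n",
           st.2 + factor)) b := by
  have hterm : ∀ (o f : Int),
      generateHashTerm ((argc - 1).toNat + 1) o f (argc - 1) = pvAltTerm o f argc := by
    intro o f
    have hcast : ((argc - 1).toNat : Int) = argc - 1 := by omega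
    have h := term_eq o f (argc - 1).toNat
    rw [hcast] at h
    simpa using h
  intro factors
  induction factors with
  | nil => intro k b; simp [PySem.List.enumerate]
  | cons x xs ih =>
    intro k b
    rw [PySem.List.enumerate_cons, List.foldl_cons, List.foldl_cons, hterm, ih]

-- the accumulated prefix of B's body fold can be pulled out of the fold
theorem fst_foldl_pull (argc : Int) :
    ∀ (fs : List Int) (s : String) (off : Int),
      (fs.foldl (fun (st : String × Int) factor =>
          (st.1 ++ "    result = result + " ++ pvAltTerm st.2 factor argc ++ ";\n",
           st.2 + factor)) (s, off)).1
      = s ++ (fs.foldl (fun (st : String × Int) factor =>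
          (st.1 ++ "    result = result + " ++ pvAltTerm st.2 factor argc ++ ";\n",
           st.2 + factor)) ("", off)).1 := by
  intro fs
  induction fs with
  | nil => intro s off; simp
  | cons f fs ihf =>
    intro s off
    simp only [List.foldl_cons]
    rw [ihf (s ++ "    result = result + " ++ pvAltTerm off f argc ++ ";\n"),
        ihf ("" ++ "    result = result + " ++ pvAltTerm off f argc ++ ";\n")]
    simp [String.append_assoc]

theorem generateHashFunction_eq (outputRange argc : Int) (factors : List Int)
    (hpre : Pre_generateHashFunction outputRange argc factors) :
    generateHashFunction outputRange argc factors = generateHashFunction_alt outputRange argc factors := by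
  rcases hpre with hnil | hargc
  · subst hnil
    simp [generateHashFunction, generateHashFunction_alt, PySem.List.enumerate, String.append_assoc]
  · unfold generateHashFunction generateHashFunction_alt
    simp only [loop_eq argc hargc]
    rw [fst_foldl_pull]
    simp [String.append_assoc]

-- ===== VERDICT (by name: the statement is the Claim_ definition above) =====
theorem generateHashFunction_spec : Claim_equal_generateHashFunction := by
  intro outputRange argc factors _ hpre
  exact generateHashFunction_eq outputRange argc factors hpre
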